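-- pv_equiv track=rewrite | github.com/jashvira/scbench-posttrain | src/scbench_posttrain/delaunay.py | _backscan_literal
-- ===== SOURCE A (Python) =====
-- def _backscan_literal(text: str) -> str | None:
--     """Backscan for the last balanced list or dict literal."""
--
--     last_bracket = -1
--     closing_bracket = ""
--     for index in range(len(text) - 1, -1, -1):
--         if text[index] in ("]", "}"):
--             last_bracket = index
--             closing_bracket = text[index]
--             break
--
--     if last_bracket == -1:
--         return None
--
--     opening_bracket = "[" if closing_bracket == "]" else "{"
--     bracket_count = 1
--     for index in range(last_bracket - 1, -1, -1):
--         if text[index] == closing_bracket: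
--             bracket_count += 1
--         elif text[index] == opening_bracket:
--             bracket_count -= 1
--             if bracket_count == 0:
--                 return text[index : last_bracket + 1]
--     return None
-- ===== SOURCE B (Python) =====
-- def _backscan_literal(text: str) -> str | None:
--     """Backscan for the last balanced list or dict literal.
--
--     One forward pass: per-type stacks of opening-bracket indices; each closing
--     bracket records (its index, the index of its matching opener or None).
--     The answer is the span recorded for the last closing bracket seen.
--     """
--     sq = []  # unmatched '[' indices
--     cr = []  # unmatched '{' indices
--     last = None  # (close index, opener index or None) of last ']' / '}'
--     for i, ch in enumerate(text):
--         if ch == '[':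
--             sq.append(i)
--         elif ch == '{':
--             cr.append(i)
--         elif ch == ']':
--             last = (i, sq.pop() if sq else None)
--         elif ch == '}':
--             last = (i, cr.pop() if cr else None)
--     if last is None or last[1] is None:
--         return None
--     return text[last[1]:last[0] + 1]
-- ===== Notes on version B (the rewrite author's own statement) =====
-- stated objective: alternative
-- what changed: Replaces A's two backward scans (find last close, then count same-type brackets back to the opener) with a single forward pass keeping per-type stacks of opening-bracket indices and recording each close's match; the answer is read off from the last close seen.
import Mathlib
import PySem

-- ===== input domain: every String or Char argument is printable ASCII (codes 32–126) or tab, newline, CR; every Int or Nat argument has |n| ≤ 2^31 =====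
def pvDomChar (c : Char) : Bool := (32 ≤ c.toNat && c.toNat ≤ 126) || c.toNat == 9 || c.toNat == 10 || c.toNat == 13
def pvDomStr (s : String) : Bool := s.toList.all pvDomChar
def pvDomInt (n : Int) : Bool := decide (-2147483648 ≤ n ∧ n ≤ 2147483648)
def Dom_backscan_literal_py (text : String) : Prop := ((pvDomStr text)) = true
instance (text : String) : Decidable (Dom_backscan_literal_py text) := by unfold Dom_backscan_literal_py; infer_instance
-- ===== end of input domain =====

-- B replaces A's two backward scans by one forward pass with per-type stacks of
-- opening-bracket indices (alternative decomposition, same cost).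

-- ===== PORT A =====
-- first loop of A: scan indices n-1, …, 0 for the last ']' or '}'
def pvFindLast (cs : List Char) : Nat → Option (Nat × Char)
  | 0 => none
  | n + 1 =>
    let ch := cs.getD n ' '
    if ch = ']' ∨ ch = '}' then some (n, ch) else pvFindLast cs n

-- second loop of A: scan down from n-1 with the bracket counter k (k ≥ 1 throughout)
def pvScanA (cs : List Char) (ob cb : Char) : Nat → Nat → Option Nat
  | 0, _ => none
  | n + 1, k =>
    let ch := cs.getD n ' '
    if ch = cb then pvScanA cs ob cb n (k + 1)
    else if ch = ob then (if k - 1 = 0 then some n else pvScanA cs ob cb n (k - 1))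
    else pvScanA cs ob cb n k

def backscan_literal_py (text : String) : Option String :=
  let cs := text.toList
  match pvFindLast cs cs.length with
  | none => none
  | some (last, cb) =>
    let ob := if cb = ']' then '[' else '{'
    match pvScanA cs ob cb last 1 with
    | none => none
    -- text[i : last+1] with 0 ≤ i ≤ last < len: exactly drop/take (PySem.List.slice_natCast)
    | some i => some (String.ofList ((cs.drop i).take (last + 1 - i)))

-- ===== PORT B =====
-- B's single forward loop: i is the current index, sq/cr the stacks of unmatched
-- '[' / '{' indices (most recent first), last the (close, opener?) of the last close
def pvRunB : List Char → Nat → List Nat → List Nat → Option (Nat × Option Nat) → Option (Nat × Option Nat)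
  | [], _, _, _, last => last
  | ch :: rest, i, sq, cr, last =>
    if ch = '[' then pvRunB rest (i + 1) (i :: sq) cr last
    else if ch = '{' then pvRunB rest (i + 1) sq (i :: cr) last
    else if ch = ']' then pvRunB rest (i + 1) sq.tail cr (some (i, sq.head?))
    else if ch = '}' then pvRunB rest (i + 1) sq cr.tail (some (i, cr.head?))
    else pvRunB rest (i + 1) sq cr last

def backscan_literal_py_alt (text : String) : Option String :=
  let cs := text.toList
  match pvRunB cs 0 [] [] none with
  | some (i, some j) => some (String.ofList ((cs.drop j).take (i + 1 - j)))
  | _ => none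

-- ===== PRECONDITION & SPEC =====
def Spec_backscan_literal_py (text : String) (out : Option String) : Prop := out = backscan_literal_py_alt text
instance (text : String) (out : Option String) : Decidable (Spec_backscan_literal_py text out) := by unfold Spec_backscan_literal_py; infer_instance

-- ===== CLAIM (what is proved, stated in full; the proofs are below) =====
def Claim_equal_backscan_literal_py : Prop := ∀ (text : String), Dom_backscan_literal_py text → Spec_backscan_literal_py text (backscan_literal_py text)

-- ===== LEMMAS AND PROOFS =====

-- the per-type stack of unmatched opening brackets after the first n characters
def pvStk (cs : List Char) (ob cb : Char) : Nat → List Nat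
  | 0 => []
  | n + 1 =>
    let ch := cs.getD n ' '
    if ch = cb then (pvStk cs ob cb n).tail
    else if ch = ob then n :: pvStk cs ob cb n
    else pvStk cs ob cb n

-- the (close index, opener?) pair for the last closing bracket among the first n chars
def pvLastInfo (cs : List Char) (n : Nat) : Option (Nat × Option Nat) :=
  (pvFindLast cs n).map
    (fun pc => (pc.1, (pvStk cs (if pc.2 = ']' then '[' else '{') pc.2 pc.1).head?))

theorem pvScanA_eq_stk (cs : List Char) (ob cb : Char) :
    ∀ n k, 1 ≤ k → pvScanA cs ob cb n k = (pvStk cs ob cb n)[k - 1]? := by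
  intro n
  induction n with
  | zero => intro k hk; simp [pvScanA, pvStk]
  | succ n ih =>
    intro k hk
    simp only [pvScanA, pvStk]
    by_cases hc : cs.getD n ' ' = cb
    · rw [if_pos hc, if_pos hc, ih (k + 1) (by omega), List.getElem?_tail]
      congr 1
      omega
    · rw [if_neg hc, if_neg hc]
      by_cases ho : cs.getD n ' ' = ob
      · rw [if_pos ho, if_pos ho]
        by_cases hk1 : k - 1 = 0
        · have hk' : k = 1 := by omega
          subst hk'
          simp
        · rw [if_neg hk1, ih (k - 1) (by omega)]
          have h2 : k - 1 = (k - 1 - 1) + 1 := by omega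
          rw [h2, List.getElem?_cons_succ]
          congr 1
      · rw [if_neg ho, if_neg ho]
        exact ih k hk

theorem pvRunB_inv (cs : List Char) :
    ∀ (l : List Char) (m : Nat), cs.drop m = l → m + l.length = cs.length →
      pvRunB l m (pvStk cs '[' ']' m) (pvStk cs '{' '}' m) (pvLastInfo cs m)
        = pvLastInfo cs cs.length := by
  intro l
  induction l with
  | nil =>
    intro m hdrop hlen
    simp at hlen
    subst hlen
    rfl
  | cons ch rest ih =>
    intro m hdrop hlen
    have hm : m < cs.length := by simp at hlen; omega
    have h := List.drop_eq_getElem_cons hm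
    rw [hdrop] at h
    injection h with h1 h2
    have hch : cs.getD m ' ' = ch := by
      simp [List.getD_eq_getElem?_getD, List.getElem?_eq_getElem hm, h1]
    have hrest : cs.drop (m + 1) = rest := h2.symm
    have hlen' : m + 1 + rest.length = cs.length := by simp at hlen; omega
    have stk1 : pvStk cs '[' ']' (m + 1)
        = (if ch = ']' then (pvStk cs '[' ']' m).tail
           else if ch = '[' then m :: pvStk cs '[' ']' m else pvStk cs '[' ']' m) := by
      simp only [pvStk, hch]
    have stk2 : pvStk cs '{' '}' (m + 1)
        = (if ch = '}' then (pvStk cs '{' '}' m).tail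
           else if ch = '{' then m :: pvStk cs '{' '}' m else pvStk cs '{' '}' m) := by
      simp only [pvStk, hch]
    have last1 : pvLastInfo cs (m + 1)
        = (if ch = ']' ∨ ch = '}'
           then some (m, (pvStk cs (if ch = ']' then '[' else '{') ch m).head?)
           else pvLastInfo cs m) := by
      simp only [pvLastInfo, pvFindLast, hch]
      split <;> simp
    simp only [pvRunB]
    by_cases hA : ch = '['
    · subst hA
      rw [if_pos rfl]
      have hih := ih (m + 1) hrest hlen'
      rw [stk1, stk2, last1] at hih
      simpa using hih
    · rw [if_neg hA]
      by_cases hB : ch = '{'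
      · subst hB
        rw [if_pos rfl]
        have hih := ih (m + 1) hrest hlen'
        rw [stk1, stk2, last1] at hih
        simpa using hih
      · rw [if_neg hB]
        by_cases hC : ch = ']'
        · subst hC
          rw [if_pos rfl]
          have hih := ih (m + 1) hrest hlen'
          rw [stk1, stk2, last1] at hih
          simpa using hih
        · rw [if_neg hC]
          by_cases hD : ch = '}'
          · subst hD
            rw [if_pos rfl]
            have hih := ih (m + 1) hrest hlen'
            rw [stk1, stk2, last1] at hih
            simpa using hih
          · rw [if_neg hD]
            have hih := ih (m + 1) hrest hlen'
            rw [stk1, stk2, last1] at hih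
            simpa [hA, hB, hC, hD] using hih

-- ===== VERDICT (by name: the statement is the Claim_ definition above) =====
theorem backscan_literal_py_spec : Claim_equal_backscan_literal_py := by
  intro text _
  unfold Spec_backscan_literal_py backscan_literal_py backscan_literal_py_alt
  have hrun : pvRunB text.toList 0 [] [] none = pvLastInfo text.toList text.toList.length := by
    have h := pvRunB_inv text.toList text.toList 0 (by simp) (by simp)
    simpa [pvStk, pvLastInfo, pvFindLast] using h
  simp only [hrun]
  cases hfl : pvFindLast text.toList text.toList.length with
  | none =>
    simp only [pvLastInfo, hfl, Option.map_none]
  | some pc =>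
    obtain ⟨p, cb⟩ := pc
    simp only [hfl, pvLastInfo, Option.map_some]
    rw [pvScanA_eq_stk text.toList _ cb p 1 (le_refl 1)]
    cases hh : (pvStk text.toList (if cb = ']' then '[' else '{') cb p).head? with
    | none => simp [← List.head?_eq_getElem?, hh]
    | some j => simp [← List.head?_eq_getElem?, hh]
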